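-- pv_equiv track=rewrite | github.com/saffolder/tictactoe | swaffKInARow.py | staticEval
-- ===== SOURCE A (Python) =====
-- K = 0 # number in a row needed
--
-- def staticEval(state):
--     # Values should be higher when the states are better for X,
--     # lower when better for O.
--     score = 0
--     # playerScore and spectatorScore based on corresponding OfK varaible at each i, j
--     # for each K sized window in every direction
--     playerScore = 0
--     playerOfK = 0 # num. of players elements in a K sized window
--     spectatorOfK = 0 # num. of spectators elements in a K sized window
--     spectatorScore = 0
--     board, player = state
--     rows = len(board)
--     cols = len(board[0])
--     spectator = "O"
--     if player == spectator: spectator = "X"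
--     directions  = [(0,1),(1,1),(1,0),(-1,1),(0,-1),(-1,-1),(-1,0),(1,-1)]
--     for i in range(rows):
--         for j in range(cols):
--             for di in range(len(directions)):
--                 if board[i][j] == player: playerOfK += 1
--                 if board[i][j] == spectator: spectatorOfK += 1
--                 dir = directions[di]
--                 iTemp = i
--                 jTemp = j
--                 for step in range(K - 1): # check a k sized window in current direction
--                     # check the coords are on the board
--                     iTemp += dir[0]
--                     if iTemp < 0 or iTemp >= rows:
--                         playerOfK = 0
--                         spectatorOfK = 0
--                         break
--                     jTemp += dir[1]
--                     if jTemp < 0 or jTemp >= cols: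
--                         playerOfK = 0
--                         spectatorOfK = 0
--                         break
--                     if board[iTemp][jTemp] == "-":
--                         playerOfK = 0
--                         spectatorOfK = 0
--                         break
--                     if board[iTemp][jTemp] == player: playerOfK += 1
--                     if board[iTemp][jTemp] == spectator: spectatorOfK += 1
--                 # this weighting system only rewards strictly K sized windows with none of other players pieces in it
--                 if playerOfK > 0 and spectatorOfK == 0:
--                     if playerOfK >= K - 1: playerScore += playerOfK**10
--                     else: playerScore += 4**playerOfK
--                 if spectatorOfK > 0 and playerOfK == 0:
--                     if spectatorOfK >= K - 1: spectatorScore += spectatorOfK**10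
--                     else: spectatorScore += 4**spectatorOfK
--                 playerOfK = 0
--                 spectatorOfK = 0
--     if player == "X":
--         score = playerScore - spectatorScore
--     else:
--         score = spectatorScore - playerScore
--     return [score]
-- ===== SOURCE B (Python) =====
-- K = 0 # number in a row needed
--
-- def staticEval(state):
--     # With K = 0 every "window" is the single cell itself and each of the 8
--     # directions scores it as 1 point, so the evaluation is a flat cell count.
--     board, player = state
--     cols = len(board[0])
--     spectator = "X" if player == "O" else "O"
--     p = sum(1 for row in board for c in row[:cols] if c == player)
--     s = sum(1 for row in board for c in row[:cols] if c == spectator)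
--     diff = 8 * (p - s)
--     return [diff if player == "X" else -diff]
-- ===== Notes on version B (the rewrite author's own statement) =====
-- stated objective: faster
-- what changed: With the module constant K = 0 the window loop is range(-1) and never runs, so A's four nested loops score each cell once per direction; B replaces them with a single flat count of player/spectator cells over the first len(board[0]) columns and returns [8*(p-s)] with the sign set by the player.
import Mathlib
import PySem

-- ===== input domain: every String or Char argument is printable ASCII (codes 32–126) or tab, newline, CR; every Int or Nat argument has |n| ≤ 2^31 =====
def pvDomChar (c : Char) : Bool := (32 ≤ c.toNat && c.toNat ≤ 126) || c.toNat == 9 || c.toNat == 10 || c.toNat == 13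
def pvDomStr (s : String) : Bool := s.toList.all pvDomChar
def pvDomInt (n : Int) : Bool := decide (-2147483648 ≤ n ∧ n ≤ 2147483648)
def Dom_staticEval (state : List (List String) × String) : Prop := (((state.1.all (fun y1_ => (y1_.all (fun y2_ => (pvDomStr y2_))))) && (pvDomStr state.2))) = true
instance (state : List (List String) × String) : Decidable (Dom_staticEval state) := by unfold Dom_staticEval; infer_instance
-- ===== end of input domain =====

-- B replaces A's four nested loops (which, with the module constant K = 0, score each single
-- cell 8 times) by a flat closed-form cell count; objective: faster (constant factor).

-- ===== PORT A =====
def pvK : Int := 0   -- module constant K = 0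

def pvDirections : List (Int × Int) := [(0,1),(1,1),(1,0),(-1,1),(0,-1),(-1,-1),(-1,0),(1,-1)]

-- body of 'for step in range(K - 1)' (with break modelled by a Bool flag)
def pvWinStep (board : List (List String)) (player spectator : String) (rows cols : Int)
    (dir : Int × Int) (st : Int × Int × Int × Int × Bool) (_step : Int) :
    Int × Int × Int × Int × Bool :=
  match st with
  | (iT, jT, pOfK, sOfK, broke) =>
    if broke then (iT, jT, pOfK, sOfK, broke) else
    let iT := iT + dir.1
    if iT < 0 ∨ iT ≥ rows then (iT, jT, 0, 0, true) else
    let jT := jT + dir.2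
    if jT < 0 ∨ jT ≥ cols then (iT, jT, 0, 0, true) else
    let c2 := PySem.List.pyGetD (PySem.List.pyGetD board iT []) jT ""
    if c2 == "-" then (iT, jT, 0, 0, true) else
    let pOfK := if c2 == player then pOfK + 1 else pOfK
    let sOfK := if c2 == spectator then sOfK + 1 else sOfK
    (iT, jT, pOfK, sOfK, false)

-- body of 'for di in range(len(directions))'; state = (playerScore, spectatorScore, playerOfK, spectatorOfK)
def pvDiBody (board : List (List String)) (player spectator : String) (rows cols i j : Int)
    (acc : Int × Int × Int × Int) (di : Int) : Int × Int × Int × Int :=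
  match acc with
  | (pS, sS, pOfK, sOfK) =>
    let cell := PySem.List.pyGetD (PySem.List.pyGetD board i []) j ""
    let pOfK := if cell == player then pOfK + 1 else pOfK
    let sOfK := if cell == spectator then sOfK + 1 else sOfK
    let dir := PySem.List.pyGetD pvDirections di ((0 : Int), (0 : Int))
    let st := (PySem.List.pyRange 0 (pvK - 1) 1).foldl
                (pvWinStep board player spectator rows cols dir) (i, j, pOfK, sOfK, false)
    let pOfK := st.2.2.1
    let sOfK := st.2.2.2.1
    -- exponents: pOfK**10 and 4**pOfK; the exponents are nonnegative wherever reached, so .toNat is exact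
    let pS := if pOfK > 0 ∧ sOfK = 0 then
                (if pOfK ≥ pvK - 1 then pS + pOfK ^ (10 : Nat) else pS + 4 ^ pOfK.toNat) else pS
    let sS := if sOfK > 0 ∧ pOfK = 0 then
                (if sOfK ≥ pvK - 1 then sS + sOfK ^ (10 : Nat) else sS + 4 ^ sOfK.toNat) else sS
    (pS, sS, 0, 0)

def pvCellLoop (board : List (List String)) (player spectator : String) (rows cols i : Int)
    (acc : Int × Int × Int × Int) (j : Int) : Int × Int × Int × Int :=
  (PySem.List.pyRange 0 ((pvDirections.length : Int)) 1).foldl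
    (pvDiBody board player spectator rows cols i j) acc

def pvRowLoop (board : List (List String)) (player spectator : String) (rows cols : Int)
    (acc : Int × Int × Int × Int) (i : Int) : Int × Int × Int × Int :=
  (PySem.List.pyRange 0 cols 1).foldl (pvCellLoop board player spectator rows cols i) acc

def staticEval (state : List (List String) × String) : List Int :=
  let board := state.1
  let player := state.2
  let rows : Int := board.length
  let cols : Int := ((PySem.List.pyGet? board 0).getD []).length   -- board[0]; Pre_ excludes the IndexError inputs
  let spectator := if player == "O" then "X" else "O"
  let res := (PySem.List.pyRange 0 rows 1).foldl
               (pvRowLoop board player spectator rows cols) ((0:Int), (0:Int), (0:Int), (0:Int))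
  let score := if player == "X" then res.1 - res.2.1 else res.2.1 - res.1
  [score]

-- ===== PORT B =====
def staticEval_alt (state : List (List String) × String) : List Int :=
  let board := state.1
  let player := state.2
  let cols : Int := ((PySem.List.pyGet? board 0).getD []).length   -- len(board[0]); Pre_ excludes the IndexError inputs
  let spectator := if player == "O" then "X" else "O"
  let p : Int := (board.map (fun row =>
      (((PySem.List.slice row none (some cols)).countP (fun c => c == player) : Int)))).sum
  let s : Int := (board.map (fun row =>
      (((PySem.List.slice row none (some cols)).countP (fun c => c == spectator) : Int)))).sum
  let diff := 8 * (p - s)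
  [if player == "X" then diff else -diff]

-- ===== PRECONDITION & SPEC =====
-- Pre_ excludes exactly the inputs where A raises IndexError: the empty board (board[0])
-- and ragged boards having a row shorter than the first row (board[i][j] with j < len(board[0])).
def Pre_staticEval (state : List (List String) × String) : Prop :=
  state.1 ≠ [] ∧ ∀ row ∈ state.1, state.1.headI.length ≤ row.length
instance (state : List (List String) × String) : Decidable (Pre_staticEval state) := by
  unfold Pre_staticEval; infer_instance

def pvWitness_staticEval : (List (List String) × String) := ([["X", "O"], ["-", "X"]], "X")

def Spec_staticEval (state : List (List String) × String) (out : List Int) : Prop := out = staticEval_alt state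
instance (state : List (List String) × String) (out : List Int) : Decidable (Spec_staticEval state out) := by unfold Spec_staticEval; infer_instance

-- ===== CLAIM (what is proved, stated in full; the proofs are below) =====
def Claim_equal_staticEval : Prop := ∀ (state : List (List String) × String), Dom_staticEval state → Pre_staticEval state → Spec_staticEval state (staticEval state)

-- ===== LEMMAS AND PROOFS =====

-- one direction iteration: with K = 0 the window loop folds over an empty range, so the step
-- just scores the single cell once (player ≠ spectator is needed: the two score branches exclude each other)
theorem pvDiBody_step (board : List (List String)) (player spectator : String)
    (hps : player ≠ spectator) (rows cols i j : Int) (pS sS di : Int) :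
    pvDiBody board player spectator rows cols i j (pS, sS, 0, 0) di =
      (pS + (if PySem.List.pyGetD (PySem.List.pyGetD board i []) j "" == player then 1 else 0),
       sS + (if PySem.List.pyGetD (PySem.List.pyGetD board i []) j "" == spectator then 1 else 0),
       0, 0) := by
  have hnil : PySem.List.pyRange 0 (pvK - 1) 1 = [] := by decide
  unfold pvDiBody
  rw [hnil]
  set c := PySem.List.pyGetD (PySem.List.pyGetD board i []) j "" with hc
  by_cases hcp : c = player
  case pos =>
    simp [hcp, pvK, hps]
  case neg =>
    by_cases hcs : c = spectator
    · simp [hcs, pvK, Ne.symm hps]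
    · simp [hcp, hcs]

theorem pvCellLoop_step (board : List (List String)) (player spectator : String)
    (hps : player ≠ spectator) (rows cols i j : Int) (pS sS : Int) :
    pvCellLoop board player spectator rows cols i (pS, sS, 0, 0) j =
      (pS + 8 * (if PySem.List.pyGetD (PySem.List.pyGetD board i []) j "" == player then 1 else 0),
       sS + 8 * (if PySem.List.pyGetD (PySem.List.pyGetD board i []) j "" == spectator then 1 else 0),
       0, 0) := by
  have h8 : PySem.List.pyRange 0 ((pvDirections.length : Int)) 1 = [0,1,2,3,4,5,6,7] := by decide
  unfold pvCellLoop
  rw [h8]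
  simp only [List.foldl_cons, List.foldl_nil,
    pvDiBody_step board player spectator hps rows cols i j]
  set a := (if PySem.List.pyGetD (PySem.List.pyGetD board i []) j "" == player then (1:Int) else 0)
  set b := (if PySem.List.pyGetD (PySem.List.pyGetD board i []) j "" == spectator then (1:Int) else 0)
  rw [Prod.mk.injEq, Prod.mk.injEq]
  refine ⟨by ring, by ring, rfl⟩

theorem pvRowLoop_count (board : List (List String)) (player spectator : String)
    (hps : player ≠ spectator) (rows cols i : Int) (row : List String)
    (hrow : row = PySem.List.pyGetD board i []) (n : Nat) (hn : n ≤ row.length) (pS sS : Int) :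
    (PySem.List.pyRange 0 (n : Int) 1).foldl (pvCellLoop board player spectator rows cols i) (pS, sS, 0, 0) =
      (pS + 8 * ((row.take n).countP (fun c => c == player) : Int),
       sS + 8 * ((row.take n).countP (fun c => c == spectator) : Int), 0, 0) := by
  induction n generalizing pS sS with
  | zero =>
    rw [PySem.List.pyRange_one_eq_nil (by omega)]
    simp
  | succ n ih =>
    have hcast : ((n + 1 : Nat) : Int) = (n : Int) + 1 := by push_cast; ring
    rw [hcast, PySem.List.pyRange_one_succ_right (by omega), List.foldl_append,
      ih (by omega), List.foldl_cons, List.foldl_nil,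
      pvCellLoop_step board player spectator hps rows cols i (n : Int)]
    have hn' : n < row.length := by omega
    have hcell : PySem.List.pyGetD (PySem.List.pyGetD board i []) ((n : Int)) "" = row[n] := by
      rw [← hrow, PySem.List.pyGetD_natCast, List.getD_eq_getElem?_getD,
        List.getElem?_eq_getElem hn']
      rfl
    rw [hcell, List.take_add_one, List.getElem?_eq_getElem hn']
    simp only [Option.toList_some, List.countP_append, List.countP_cons, List.countP_nil]
    rw [Prod.mk.injEq, Prod.mk.injEq]
    refine ⟨?_, ?_, rfl⟩ <;> by_cases h1 : row[n] == player <;> by_cases h2 : row[n] == spectator <;>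
      simp [h1, h2] <;> ring

theorem pvBoardLoop_count (board : List (List String)) (player spectator : String)
    (hps : player ≠ spectator) (rows cols : Int) (m : Nat) (hm : m ≤ board.length)
    (hcols : ∀ row ∈ board, cols.toNat ≤ row.length) (hc0 : 0 ≤ cols) (pS sS : Int) :
    (PySem.List.pyRange 0 (m : Int) 1).foldl (pvRowLoop board player spectator rows cols) (pS, sS, 0, 0) =
      (pS + 8 * ((board.take m).map (fun row => ((row.take cols.toNat).countP (fun c => c == player) : Int))).sum,
       sS + 8 * ((board.take m).map (fun row => ((row.take cols.toNat).countP (fun c => c == spectator) : Int))).sum,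
       0, 0) := by
  induction m generalizing pS sS with
  | zero =>
    rw [PySem.List.pyRange_one_eq_nil (by omega)]
    simp
  | succ m ih =>
    have hcast : ((m + 1 : Nat) : Int) = (m : Int) + 1 := by push_cast; ring
    rw [hcast, PySem.List.pyRange_one_succ_right (by omega), List.foldl_append,
      ih (by omega), List.foldl_cons, List.foldl_nil]
    have hm' : m < board.length := by omega
    have hrow : board[m] = PySem.List.pyGetD board ((m : Int)) [] := by
      rw [PySem.List.pyGetD_natCast, List.getD_eq_getElem?_getD, List.getElem?_eq_getElem hm']
      rfl
    have hclen : cols.toNat ≤ board[m].length := hcols _ (List.getElem_mem hm')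
    rw [pvRowLoop,
      show PySem.List.pyRange 0 cols 1 = PySem.List.pyRange 0 ((cols.toNat : Nat) : Int) 1 by
        rw [Int.toNat_of_nonneg hc0],
      pvRowLoop_count board player spectator hps rows cols ((m : Int)) board[m] hrow cols.toNat hclen,
      List.take_add_one, List.getElem?_eq_getElem hm']
    simp only [Option.toList_some, List.map_append, List.sum_append, List.map_cons,
      List.map_nil, List.sum_cons, List.sum_nil]
    rw [Prod.mk.injEq, Prod.mk.injEq]
    refine ⟨by ring, by ring, rfl⟩

-- ===== VERDICT (by name: the statement is the Claim_ definition above) =====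
theorem staticEval_spec : Claim_equal_staticEval := by
  rintro ⟨board, player⟩ _ ⟨hne, hall⟩
  unfold Spec_staticEval
  cases board with
  | nil => exact absurd rfl hne
  | cons r0 rest =>
    have hps : player ≠ (if player == "O" then "X" else "O") := by
      by_cases h : player = "O" <;> simp [h]
    have hcols : ∀ row ∈ r0 :: rest, ((r0.length : Int)).toNat ≤ row.length := by
      intro row hrow
      simpa using hall row hrow
    simp only [staticEval, staticEval_alt, PySem.List.pyGet?_zero_cons, Option.getD_some]
    rw [pvBoardLoop_count (r0 :: rest) player _ hps _ _ (r0 :: rest).length le_rfl hcols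
      (by positivity) 0 0]
    simp only [List.take_length, Int.toNat_natCast, PySem.List.slice_to_natCast]
    by_cases hX : player = "X"
    · simp only [hX]
      norm_num
      ring
    · have hbx : (player == "X") = false := by simpa using hX
      simp only [hbx, Bool.false_eq_true, if_false]
      congr 1
      ring
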